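-- pv_equiv track=rewrite | github.com/archanray/codiing_practice | minimum_substrings_wo_rep_chars_microsoft.py | solution
-- ===== SOURCE A (Python) =====
-- def solution(word):
--     dictOfChars = {}
--     count = 1
--     n = len(word)
--     for i in range(n):
--         if dictOfChars.get(word[i], 0) == 0:
--             dictOfChars[word[i]] = i+1
--         else:
--             count += 1
--             dictOfChars = {}
--             dictOfChars[word[i]] = i+1
--     return count
-- ===== SOURCE B (Python) =====
-- def solution(word):
--     count = 1
--     while True:
--         i = 1
--         while i < len(word) and word[i] not in word[:i]:
--             i += 1
--         if i >= len(word):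
--             return count
--         word = word[i:]
--         count += 1
-- ===== Notes on version B (the rewrite author's own statement) =====
-- stated objective: alternative
-- what changed: Replaces A's single index-loop with a reset-on-repeat dict by a two-level segment-stripping loop: an inner scan finds the first index whose character already occurs in the prefix (substring membership, no table), the outer loop strips that prefix and counts segments.
import Mathlib
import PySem

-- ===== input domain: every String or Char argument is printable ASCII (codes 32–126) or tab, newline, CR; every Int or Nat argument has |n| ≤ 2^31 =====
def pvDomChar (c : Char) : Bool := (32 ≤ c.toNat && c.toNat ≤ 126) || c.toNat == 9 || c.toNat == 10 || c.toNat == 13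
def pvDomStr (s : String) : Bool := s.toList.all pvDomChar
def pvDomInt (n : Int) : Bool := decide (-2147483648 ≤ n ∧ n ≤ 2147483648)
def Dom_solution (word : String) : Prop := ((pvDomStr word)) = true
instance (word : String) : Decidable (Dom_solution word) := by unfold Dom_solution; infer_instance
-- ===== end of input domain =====

-- B replaces A's dict-with-reset index loop by iterative segment stripping (scan for the
-- first repeat in the prefix, strip it, continue on the suffix); objective: alternative decomposition.


-- ===== PORT A =====
-- loop body of A: state = (dictOfChars, count); word[i] via pyGetD (i is always in range here)
def solutionStep (l : List Char) (st : PySem.Dict Char Int × Int) (i : Int) :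
    PySem.Dict Char Int × Int :=
  let ch := PySem.List.pyGetD l i ' '
  if st.1.getD ch 0 == 0 then (st.1.insert ch (i + 1), st.2)
  else (PySem.Dict.empty.insert ch (i + 1), st.2 + 1)

def solution (word : String) : Int :=
  ((PySem.List.pyRange 0 (PySem.Str.len word) 1).foldl (solutionStep word.toList)
      (PySem.Dict.empty, 1)).2

-- ===== PORT B =====
-- B's inner 'for i in range(1, len(word)): if word[i] in word[:i]' scan: first index
-- i ≥ start with word[i] occurring in word[:i] (word[:i] = take i is exact for i ≥ 0)
def solutionAltFind (l : List Char) (i : Nat) : Option Nat :=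
  if h : i < l.length then
    if l[i] ∈ l.take i then some i else solutionAltFind l (i + 1)
  else none
termination_by l.length - i

-- spec of the scan, cited by solutionAltCore's decreasing_by
lemma solutionAltFind_some_bounds (l : List Char) :
    ∀ j i, solutionAltFind l j = some i → j ≤ i ∧ i < l.length := by
  intro j i h
  fun_induction solutionAltFind l j with
  | case1 j hlt hmem => cases h; omega
  | case2 j hlt hmem ih => have := ih h; omega
  | case3 j hge => exact absurd h (by simp)

-- B's outer 'while True' loop: strip the longest duplicate-free prefix (word = word[i:]),
-- bump count, continue; return count when the scan reaches the end
def solutionAltCore (l : List Char) (count : Int) : Int :=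
  match h : solutionAltFind l 1 with
  | some i => solutionAltCore (l.drop i) (count + 1)
  | none => count
termination_by l.length
decreasing_by
  have := solutionAltFind_some_bounds l 1 i h
  simp [List.length_drop]; omega

def solution_alt (word : String) : Int := solutionAltCore word.toList 1

-- ===== PRECONDITION & SPEC =====
def Spec_solution (word : String) (out : Int) : Prop := out = solution_alt word
instance (word : String) (out : Int) : Decidable (Spec_solution word out) := by unfold Spec_solution; infer_instance

-- ===== CLAIM (what is proved, stated in full; the proofs are below) =====
def Claim_equal_solution : Prop := ∀ (word : String), Dom_solution word → Spec_solution word (solution word)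

-- ===== LEMMAS AND PROOFS =====

lemma solutionAltFind_some_spec (l : List Char) :
    ∀ j i, solutionAltFind l j = some i →
      ∃ h : i < l.length, l[i] ∈ l.take i ∧
        ∀ t (ht : t < l.length), j ≤ t → t < i → l[t] ∉ l.take t := by
  intro j i h
  fun_induction solutionAltFind l j with
  | case1 j hlt hmem =>
      cases h
      exact ⟨hlt, hmem, fun t ht h1 h2 => by omega⟩
  | case2 j hlt hmem ih =>
      obtain ⟨hi, hm, hno⟩ := ih h
      refine ⟨hi, hm, fun t ht h1 h2 => ?_⟩
      rcases Nat.eq_or_lt_of_le h1 with rfl | h1'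
      · exact hmem
      · exact hno t ht h1' h2
  | case3 j hge => exact absurd h (by simp)

lemma solutionAltFind_none_spec (l : List Char) :
    ∀ j, solutionAltFind l j = none →
      ∀ t (ht : t < l.length), j ≤ t → l[t] ∉ l.take t := by
  intro j h t ht h1
  fun_induction solutionAltFind l j with
  | case1 j hlt hmem => exact absurd h (by simp)
  | case2 j hlt hmem ih =>
      rcases Nat.eq_or_lt_of_le h1 with rfl | h1'
      · exact hmem
      · exact ih h h1'
  | case3 j hge => omega

-- A's fold over a duplicate-free prefix: the count is unchanged and the dict holds
-- exactly the characters of the prefix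
lemma pv_prefix (l : List Char) :
    ∀ (j : Nat) (c : Int), j ≤ l.length →
      (∀ t (ht : t < l.length), t < j → l[t] ∉ l.take t) →
      ∃ d, ((List.range j).map Int.ofNat).foldl (solutionStep l) (PySem.Dict.empty, c) = (d, c)
        ∧ ∀ ch, (d.getD ch 0 = 0 ↔ ch ∉ l.take j) := by
  intro j
  induction j with
  | zero =>
      intro c _ _
      exact ⟨PySem.Dict.empty, rfl, by intro ch; simp [PySem.Dict.getD_empty]⟩
  | succ j ih =>
      intro c hj hno
      have hjl : j < l.length := hj
      obtain ⟨d, hd, hinv⟩ := ih c (Nat.le_of_succ_le hj)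
        (fun t ht h1 => hno t ht (Nat.lt_succ_of_lt h1))
      rw [List.range_succ, List.map_append, List.foldl_append, hd,
        List.map_singleton, List.foldl_cons, List.foldl_nil]
      have hch : PySem.List.pyGetD l (Int.ofNat j) ' ' = l[j] := by
        rw [Int.ofNat_eq_natCast, PySem.List.pyGetD_natCast, List.getD_eq_getElem l ' ' hjl]
      have hfresh : l[j] ∉ l.take j := hno j hjl (Nat.lt_succ_self j)
      have h0 : d.getD l[j] 0 = 0 := (hinv l[j]).mpr hfresh
      refine ⟨d.insert l[j] (Int.ofNat j + 1), ?_, ?_⟩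
      · simp only [solutionStep, hch, beq_iff_eq]
        rw [if_pos h0]
      · intro ch
        have htk : l.take (j + 1) = l.take j ++ [l[j]] := by
          rw [List.take_add_one, List.getElem?_eq_getElem hjl]; rfl
        rw [htk]
        by_cases hce : ch = l[j]
        · subst hce
          rw [PySem.Dict.getD_insert_self]
          simp only [List.mem_append, List.mem_singleton, or_true, not_true_eq_false,
            iff_false]
          simp only [Int.ofNat_eq_natCast]
          omega
        · rw [PySem.Dict.getD_insert_of_ne _ _ _ hce, hinv ch]
          constructor
          · intro h hmem
            rcases List.mem_append.mp hmem with h' | h'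
            · exact h h'
            · exact hce (List.mem_singleton.mp h')
          · intro h h'
            exact h (List.mem_append.mpr (Or.inl h'))

-- the shift lemma: A's fold over indices [k+j, k+j+m) of l, from membership-equivalent
-- dicts and equal counts, yields the same count as the fold over [j, j+m) of l.drop k
lemma pv_shift (l : List Char) (k : Nat) :
    ∀ (m j : Nat) (d1 d2 : PySem.Dict Char Int) (c : Int), k + j + m ≤ l.length →
      (∀ ch, d1.getD ch 0 = 0 ↔ d2.getD ch 0 = 0) →
      (((List.range' (k + j) m).map Int.ofNat).foldl (solutionStep l) (d1, c)).2
        = (((List.range' j m).map Int.ofNat).foldl (solutionStep (l.drop k)) (d2, c)).2 := by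
  intro m
  induction m with
  | zero => intro j d1 d2 c _ _; rfl
  | succ m ih =>
      intro j d1 d2 c hb heq
      rw [List.range'_succ, List.range'_succ]
      simp only [List.map_cons, List.foldl_cons]
      have hjl : k + j < l.length := by omega
      have hdl : j < (l.drop k).length := by rw [List.length_drop]; omega
      have hch1 : PySem.List.pyGetD l (Int.ofNat (k + j)) ' ' = l[k + j] := by
        rw [Int.ofNat_eq_natCast, PySem.List.pyGetD_natCast, List.getD_eq_getElem l ' ' hjl]
      have hch2 : PySem.List.pyGetD (l.drop k) (Int.ofNat j) ' ' = l[k + j] := by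
        rw [Int.ofNat_eq_natCast, PySem.List.pyGetD_natCast,
          List.getD_eq_getElem _ ' ' hdl, List.getElem_drop]
      have hins : ∀ (e1 e2 : PySem.Dict Char Int) (v1 v2 : Int), v1 ≠ 0 → v2 ≠ 0 →
          (∀ ch', e1.getD ch' 0 = 0 ↔ e2.getD ch' 0 = 0) →
          ∀ ch', (e1.insert l[k + j] v1).getD ch' 0 = 0 ↔
            (e2.insert l[k + j] v2).getD ch' 0 = 0 := by
        intro e1 e2 v1 v2 hv1 hv2 he ch'
        by_cases hc : ch' = l[k + j]
        · subst hc
          rw [PySem.Dict.getD_insert_self, PySem.Dict.getD_insert_self]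
          exact iff_of_false hv1 hv2
        · rw [PySem.Dict.getD_insert_of_ne _ _ _ hc, PySem.Dict.getD_insert_of_ne _ _ _ hc]
          exact he ch'
      by_cases h0 : d2.getD l[k + j] 0 = 0
      · have h1 : d1.getD l[k + j] 0 = 0 := (heq l[k + j]).mpr h0
        simp only [solutionStep, hch1, hch2, beq_iff_eq]
        rw [if_pos h1, if_pos h0]
        exact ih (j + 1) _ _ c (by omega)
          (hins d1 d2 _ _ (by simp only [Int.ofNat_eq_natCast]; omega)
            (by simp only [Int.ofNat_eq_natCast]; omega) heq)
      · have h1 : ¬ d1.getD l[k + j] 0 = 0 := fun h => h0 ((heq l[k + j]).mp h)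
        simp only [solutionStep, hch1, hch2, beq_iff_eq]
        rw [if_neg h1, if_neg h0]
        exact ih (j + 1) _ _ (c + 1) (by omega)
          (hins PySem.Dict.empty PySem.Dict.empty _ _
            (by simp only [Int.ofNat_eq_natCast]; omega)
            (by simp only [Int.ofNat_eq_natCast]; omega)
            (fun _ => Iff.rfl))

-- main: A's fold from an empty dict and count c computes c - 1 + B's segment count
lemma pv_main_aux (n : Nat) : ∀ (l : List Char), l.length = n → ∀ (c : Int),
    (((List.range l.length).map Int.ofNat).foldl (solutionStep l) (PySem.Dict.empty, c)).2
      = solutionAltCore l c := by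
  induction n using Nat.strong_induction_on with
  | _ n ih =>
  intro l hlen c
  cases h : solutionAltFind l 1 with
  | none =>
      have hno : ∀ t (ht : t < l.length), l[t] ∉ l.take t := by
        intro t ht
        match t with
        | 0 => simp
        | t + 1 => exact solutionAltFind_none_spec l 1 h (t + 1) ht (by omega)
      obtain ⟨d, hd, -⟩ := pv_prefix l l.length c le_rfl (fun t ht _ => hno t ht)
      rw [hd]
      have hcore : solutionAltCore l c = c := by rw [solutionAltCore, h]
      rw [hcore]
  | some i =>
      obtain ⟨h1i, hil⟩ := solutionAltFind_some_bounds l 1 i h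
      obtain ⟨hi, hmem, hno⟩ := solutionAltFind_some_spec l 1 i h
      have hnoall : ∀ t (ht : t < l.length), t < i → l[t] ∉ l.take t := by
        intro t ht hti
        match t with
        | 0 => simp
        | t + 1 => exact hno (t + 1) ht (by omega) hti
      obtain ⟨d, hd, hinv⟩ := pv_prefix l i c (le_of_lt hil) (fun t ht hti => hnoall t ht hti)
      have hcore : solutionAltCore l c = solutionAltCore (l.drop i) (c + 1) := by
        rw [solutionAltCore, h]
      -- split A's index range at i+1
      have hsplit : List.range l.length
          = List.range (i + 1) ++ List.range' (i + 1) (l.length - (i + 1)) := by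
        rw [List.range_eq_range', List.range_eq_range']
        rw [show l.length = (i + 1) + (l.length - (i + 1)) by omega]
        rw [← List.range'_append]
        simp
      rw [hsplit, List.map_append, List.foldl_append]
      -- the prefix fold up to and including index i
      have hch : PySem.List.pyGetD l (Int.ofNat i) ' ' = l[i] := by
        rw [Int.ofNat_eq_natCast, PySem.List.pyGetD_natCast, List.getD_eq_getElem l ' ' hi]
      have h0 : ¬ d.getD l[i] 0 = 0 := fun h' => absurd hmem ((hinv l[i]).mp h')
      have hpre : ((List.range (i + 1)).map Int.ofNat).foldl (solutionStep l)
          (PySem.Dict.empty, c) = (PySem.Dict.empty.insert l[i] (Int.ofNat i + 1), c + 1) := by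
        rw [List.range_succ, List.map_append, List.foldl_append, hd,
          List.map_singleton, List.foldl_cons, List.foldl_nil]
        simp only [solutionStep, hch, beq_iff_eq]
        rw [if_neg h0]
      rw [hpre]
      -- the suffix fold, via the shift lemma and the induction hypothesis on l.drop i
      have hdlen : (l.drop i).length = l.length - i := List.length_drop
      have hih := ih (l.length - i) (by subst hlen; omega) (l.drop i) hdlen (c + 1)
      have hdec : List.range (l.drop i).length
          = 0 :: List.range' 1 (l.length - (i + 1)) := by
        rw [hdlen, List.range_eq_range',
          show l.length - i = (l.length - (i + 1)) + 1 by omega, List.range'_succ]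
      rw [hdec, List.map_cons, List.foldl_cons] at hih
      have hch0 : PySem.List.pyGetD (l.drop i) (Int.ofNat 0) ' ' = l[i] := by
        rw [Int.ofNat_eq_natCast, PySem.List.pyGetD_natCast,
          List.getD_eq_getElem _ ' ' (by omega), List.getElem_drop]
        simp
      have hstep0 : solutionStep (l.drop i) (PySem.Dict.empty, c + 1) (Int.ofNat 0)
          = (PySem.Dict.empty.insert l[i] (Int.ofNat 0 + 1), c + 1) := by
        simp only [solutionStep, hch0, beq_iff_eq]
        rw [if_pos (PySem.Dict.getD_empty _ _)]
      rw [hstep0] at hih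
      have heq : ∀ ch', (PySem.Dict.empty.insert l[i] (Int.ofNat i + 1)).getD ch' 0 = 0 ↔
          (PySem.Dict.empty.insert l[i] (Int.ofNat 0 + 1)).getD ch' 0 = 0 := by
        intro ch'
        by_cases hc : ch' = l[i]
        · subst hc
          rw [PySem.Dict.getD_insert_self, PySem.Dict.getD_insert_self]
          simp only [Int.ofNat_eq_natCast]
          constructor <;> (intro h'; omega)
        · rw [PySem.Dict.getD_insert_of_ne _ _ _ hc, PySem.Dict.getD_insert_of_ne _ _ _ hc]
      have hshift := pv_shift l i (l.length - (i + 1)) 1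
        (PySem.Dict.empty.insert l[i] (Int.ofNat i + 1))
        (PySem.Dict.empty.insert l[i] (Int.ofNat 0 + 1)) (c + 1) (by omega) heq
      rw [show i + 1 = i + 1 from rfl] at hshift
      rw [hshift, hih, hcore]

-- ===== VERDICT (by name: the statement is the Claim_ definition above) =====
theorem solution_spec : Claim_equal_solution := by
  intro word _
  unfold Spec_solution solution solution_alt
  have hr : PySem.List.pyRange 0 (PySem.Str.len word) 1
      = List.map Int.ofNat (List.range word.toList.length) := by
    rw [PySem.List.pyRange_one]
    simp [PySem.Str.len_eq]
  rw [hr, pv_main_aux word.toList.length word.toList rfl]
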